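-- pv_equiv track=rewrite | github.com/hobzy987/PhiDSC-DALI | align_matrix.py | String_character_counter
-- ===== SOURCE A (Python) =====
-- def String_character_counter(string, start):
--     string = str(string)
--     start = int(start)
--     # end = int(end)
--     counter_list = []
--     # if start != end:
--     for char in string:
--         if char.isalpha() is True:
--             counter_list.append(start)
--             start = start + 1
--         if not char.isalpha():
--             counter_list.append(0)
--
--     return counter_list
-- ===== SOURCE B (Python) =====
-- def String_character_counter(string, start):
--     string = str(string)
--     start = int(start)
--     # pass 1: number of alphabetic characters strictly before each position
--     counts = []
--     n = 0
--     for c in string: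
--         counts.append(n)
--         n += 1 if c.isalpha() else 0
--     # pass 2: emit start + count-before for alphabetic chars, 0 otherwise
--     return [start + k if c.isalpha() else 0 for c, k in zip(string, counts)]
-- ===== Notes on version B (the rewrite author's own statement) =====
-- stated objective: alternative
-- what changed: Replaces A's single stateful loop (mutating start, two conditional appends) by two passes: a prefix-count list of alphabetic characters built first, then a stateless comprehension over zip(string, counts) computing each output from start plus the count-before.
import Mathlib
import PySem

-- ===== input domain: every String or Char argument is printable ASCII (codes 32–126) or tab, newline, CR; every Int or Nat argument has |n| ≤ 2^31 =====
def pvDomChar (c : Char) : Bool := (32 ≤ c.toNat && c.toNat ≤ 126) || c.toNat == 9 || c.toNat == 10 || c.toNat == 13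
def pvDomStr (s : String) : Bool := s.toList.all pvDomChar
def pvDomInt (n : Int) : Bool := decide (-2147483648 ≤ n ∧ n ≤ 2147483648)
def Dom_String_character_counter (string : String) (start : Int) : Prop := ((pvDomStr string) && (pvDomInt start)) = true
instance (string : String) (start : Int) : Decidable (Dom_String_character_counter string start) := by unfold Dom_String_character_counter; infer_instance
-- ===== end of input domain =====

-- B replaces A's single stateful loop by a prefix-count pass plus a stateless map over zip;
-- same cost, different decomposition (objective: alternative). A mutates no argument.

-- ===== PORT A =====
-- A: one loop, mutating `start`, two conditional appends per character.
-- loop body of A (the two sequential ifs, `start` reassigned in between)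
def pvStepA (st : List Int × Int) (char : Char) : List Int × Int :=
  let st := if PySem.Chars.isalpha char then (st.1 ++ [st.2], st.2 + 1) else st
  if !PySem.Chars.isalpha char then (st.1 ++ [0], st.2) else st

def String_character_counter (string : String) (start : Int) : List Int :=
  (string.toList.foldl pvStepA ([], start)).1

-- ===== PORT B =====
-- B: pass 1 builds counts (alphabetic chars strictly before each position),
-- pass 2 is a stateless map over zip(string, counts).
def String_character_counter_alt (string : String) (start : Int) : List Int :=
  let s := string.toList
  let counts := (s.foldl (fun (st : List Int × Int) c =>
      (st.1 ++ [st.2], st.2 + (if PySem.Chars.isalpha c then 1 else 0))) ([], 0)).1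
  (s.zip counts).map (fun p => if PySem.Chars.isalpha p.1 then start + p.2 else 0)

-- ===== PRECONDITION & SPEC =====
def Spec_String_character_counter (string : String) (start : Int) (out : List Int) : Prop := out = String_character_counter_alt string start
instance (string : String) (start : Int) (out : List Int) : Decidable (Spec_String_character_counter string start out) := by unfold Spec_String_character_counter; infer_instance

-- ===== CLAIM (what is proved, stated in full; the proofs are below) =====
def Claim_equal_String_character_counter : Prop := ∀ (string : String) (start : Int), Dom_String_character_counter string start → Spec_String_character_counter string start (String_character_counter string start)

-- ===== LEMMAS AND PROOFS =====

-- reference recursion: the value both programs compute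
def pvG : List Char → Int → List Int
  | [], _ => []
  | c :: cs, st =>
      if PySem.Chars.isalpha c then st :: pvG cs (st + 1) else 0 :: pvG cs st

-- counts-before list built by B's first pass, starting at n
def pvCounts : List Char → Int → List Int
  | [], _ => []
  | c :: cs, n => n :: pvCounts cs (n + (if PySem.Chars.isalpha c then 1 else 0))

lemma A_step (p : List Int × Int) (c : Char) :
    pvStepA p c
    = if PySem.Chars.isalpha c then (p.1 ++ [p.2], p.2 + 1) else (p.1 ++ [0], p.2) := by
  by_cases h : PySem.Chars.isalpha c <;> simp [pvStepA, h]

lemma A_loop (cs : List Char) (acc : List Int) (st : Int) :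
    (cs.foldl pvStepA (acc, st)).1 = acc ++ pvG cs st := by
  induction cs generalizing acc st with
  | nil => simp [pvG]
  | cons c cs ih =>
      rw [List.foldl_cons, A_step]
      by_cases h : PySem.Chars.isalpha c
      · rw [if_pos h, ih]; simp [pvG, h]
      · rw [if_neg h, ih]; simp [pvG, h]

lemma B_counts (cs : List Char) (acc : List Int) (n : Int) :
    (cs.foldl (fun (st : List Int × Int) c =>
      (st.1 ++ [st.2], st.2 + (if PySem.Chars.isalpha c then 1 else 0))) (acc, n)).1
    = acc ++ pvCounts cs n := by
  induction cs generalizing acc n with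
  | nil => simp [pvCounts]
  | cons c cs ih => rw [List.foldl_cons, ih]; simp [pvCounts]

lemma B_map (cs : List Char) (start n : Int) :
    ((cs.zip (pvCounts cs n)).map
      (fun p => if PySem.Chars.isalpha p.1 then start + p.2 else 0))
    = pvG cs (start + n) := by
  induction cs generalizing n with
  | nil => simp [pvCounts, pvG]
  | cons c cs ih =>
      by_cases h : PySem.Chars.isalpha c
      · simp only [pvCounts, pvG, h, List.zip_cons_cons, List.map_cons, if_true, ih,
          add_assoc]
      · simp only [pvCounts, pvG, h, List.zip_cons_cons, List.map_cons, if_false,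
          Bool.false_eq_true, ite_false, add_zero, ih]

lemma A_eq (string : String) (start : Int) :
    String_character_counter string start = pvG string.toList start := by
  unfold String_character_counter
  rw [A_loop]
  simp

lemma B_eq (string : String) (start : Int) :
    String_character_counter_alt string start = pvG string.toList start := by
  show ((string.toList.zip ((string.toList.foldl (fun (st : List Int × Int) c =>
      (st.1 ++ [st.2], st.2 + (if PySem.Chars.isalpha c then 1 else 0))) ([], 0)).1)).map
      (fun p => if PySem.Chars.isalpha p.1 then start + p.2 else 0)) = pvG string.toList start
  rw [B_counts]
  simp only [List.nil_append]
  rw [B_map]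
  norm_num

-- ===== VERDICT (by name: the statement is the Claim_ definition above) =====
theorem String_character_counter_spec : Claim_equal_String_character_counter := by
  intro string start _
  show String_character_counter string start = String_character_counter_alt string start
  rw [A_eq, B_eq]
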